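-- pv_equiv track=rewrite | github.com/eskousbol/AdventOfCode | 2023/q3a.py | removeNumberFromRow
-- ===== SOURCE A (Python) =====
-- def removeNumberFromRow(row, number, index, row_length):
--   # Go back to get first
--   new_row = dict(row)
--   keys = row.keys()
--   for i in list(reversed(range(0, index))):
--     if i in keys:
--       if new_row[i] == number:
--         del new_row[i]
--       else:
--         break
--     else:
--       break
--
--   for i in range(index, row_length):
--     if i in keys:
--       if new_row[i] == number:
--         del new_row[i]
--       else:
--         break
--     else:
--       break
--
--   return new_row
-- ===== SOURCE B (Python) =====
-- def removeNumberFromRow(row, number, index, row_length):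
--   # A key is removed iff the whole stretch of cells between it and `index`
--   # (inclusive of the key itself on the forward side) holds `number`,
--   # staying inside the row bounds [0, row_length).
--   def removed(k):
--     if k < index:
--       return 0 <= k and all(j in row and row[j] == number for j in range(k, index))
--     return k < row_length and all(j in row and row[j] == number for j in range(index, k + 1))
--   return {k: v for k, v in row.items() if not removed(k)}
-- ===== Notes on version B (the rewrite author's own statement) =====
-- stated objective: alternative
-- what changed: A deletes keys from a dict copy in two sequential scan-with-break loops; B has no scan state at all: it keeps each item by an independent per-key declarative test (a key is removed iff every cell between it and index, within [0, row_length), holds number), checked with all() over a range.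
import Mathlib
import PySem

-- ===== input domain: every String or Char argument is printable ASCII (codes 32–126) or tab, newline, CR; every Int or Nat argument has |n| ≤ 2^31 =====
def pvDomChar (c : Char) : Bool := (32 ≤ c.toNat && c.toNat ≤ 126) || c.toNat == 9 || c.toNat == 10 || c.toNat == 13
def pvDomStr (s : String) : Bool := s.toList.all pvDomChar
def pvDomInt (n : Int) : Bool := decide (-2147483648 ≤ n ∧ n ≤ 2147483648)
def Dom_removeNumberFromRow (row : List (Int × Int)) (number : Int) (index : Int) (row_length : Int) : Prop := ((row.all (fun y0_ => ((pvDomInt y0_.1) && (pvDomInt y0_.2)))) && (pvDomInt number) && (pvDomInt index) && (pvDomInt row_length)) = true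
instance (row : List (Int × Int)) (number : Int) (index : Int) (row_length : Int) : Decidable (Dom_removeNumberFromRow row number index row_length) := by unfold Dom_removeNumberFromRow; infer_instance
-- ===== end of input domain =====

-- B replaces A's two dict-mutating scan-with-break loops by an independent per-key
-- declarative test (key removed iff the whole stretch between it and index, inside
-- [0, row_length), holds number); objective: alternative algorithm, not faster.

-- ===== PORT A =====
-- backward loop 'for i in list(reversed(range(0, index)))' with break:
-- fuel n means the remaining indices are n-1, n-2, …, 0
def pvBackA (keys : List Int) (number : Int) : PySem.Dict Int Int → Nat → PySem.Dict Int Int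
  | d, 0 => d
  | d, Nat.succ n =>
      if keys.contains (n : Int) then
        if d.get? (n : Int) = some number then pvBackA keys number (d.erase (n : Int)) n
        else d
      else d

-- forward loop 'for i in range(index, row_length)' with break
def pvFwdA (keys : List Int) (number : Int) : PySem.Dict Int Int → Int → Nat → PySem.Dict Int Int
  | d, _, 0 => d
  | d, i, Nat.succ n =>
      if keys.contains i then
        if d.get? i = some number then pvFwdA keys number (d.erase i) (i + 1) n
        else d
      else d

def removeNumberFromRow (row : List (Int × Int)) (number : Int) (index : Int) (row_length : Int) : List (Int × Int) :=
  let new_row := PySem.Dict.ofList row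
  let keys := (PySem.Dict.ofList row).keys
  let d1 := pvBackA keys number new_row index.toNat
  (pvFwdA keys number d1 index (row_length - index).toNat).items

-- ===== PORT B =====
-- 'removed(k)': 'j in row and row[j] == number' is exactly 'd.get? j = some number'
-- (the 'and' short-circuits the lookup, so no KeyError arises in Python)
def pvRemovedB (d : PySem.Dict Int Int) (number : Int) (index : Int) (row_length : Int) (k : Int) : Bool :=
  if k < index then
    decide (0 ≤ k) && (PySem.List.pyRange k index 1).all (fun j => d.get? j == some number)
  else
    decide (k < row_length) && (PySem.List.pyRange index (k + 1) 1).all (fun j => d.get? j == some number)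

def removeNumberFromRow_alt (row : List (Int × Int)) (number : Int) (index : Int) (row_length : Int) : List (Int × Int) :=
  let d := PySem.Dict.ofList row
  d.items.filter (fun kv => !(pvRemovedB d number index row_length kv.1))

-- ===== PRECONDITION & SPEC =====
def Spec_removeNumberFromRow (row : List (Int × Int)) (number : Int) (index : Int) (row_length : Int) (out : List (Int × Int)) : Prop := out = removeNumberFromRow_alt row number index row_length
instance (row : List (Int × Int)) (number : Int) (index : Int) (row_length : Int) (out : List (Int × Int)) : Decidable (Spec_removeNumberFromRow row number index row_length out) := by unfold Spec_removeNumberFromRow; infer_instance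

-- ===== CLAIM (what is proved, stated in full; the proofs are below) =====
def Claim_equal_removeNumberFromRow : Prop := ∀ (row : List (Int × Int)) (number : Int) (index : Int) (row_length : Int), Dom_removeNumberFromRow row number index row_length → Spec_removeNumberFromRow row number index row_length (removeNumberFromRow row number index row_length)

-- ===== LEMMAS AND PROOFS =====

-- proof-side description of A's two loops as a removal span [low, high)
def pvLowA (d : PySem.Dict Int Int) (number : Int) : Int → Nat → Int
  | low, 0 => low
  | low, Nat.succ f =>
      if 0 < low ∧ d.get? (low - 1) = some number then pvLowA d number (low - 1) f else low

def pvHighA (d : PySem.Dict Int Int) (number : Int) (row_length : Int) : Int → Nat → Int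
  | high, 0 => high
  | high, Nat.succ f =>
      if high < row_length ∧ d.get? high = some number then pvHighA d number row_length (high + 1) f else high

lemma keys_contains_eq (d : PySem.Dict Int Int) (i : Int) :
    d.keys.contains i = (d.get? i).isSome := by
  rw [← PySem.Dict.contains_eq_isSome_get?, PySem.Dict.contains_eq_decide_mem_keys]
  simp

lemma pvLowA_le (d : PySem.Dict Int Int) (num : Int) :
    ∀ (f : Nat) (low : Int), pvLowA d num low f ≤ low := by
  intro f
  induction f with
  | zero => intro low; simp [pvLowA]
  | succ f ih =>
      intro low
      simp only [pvLowA]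
      split
      · exact le_trans (ih (low - 1)) (by omega)
      · exact le_refl _

lemma le_pvHighA (d : PySem.Dict Int Int) (num rl : Int) :
    ∀ (f : Nat) (high : Int), high ≤ pvHighA d num rl high f := by
  intro f
  induction f with
  | zero => intro high; simp [pvHighA]
  | succ f ih =>
      intro high
      simp only [pvHighA]
      split
      · exact le_trans (by omega) (ih (high + 1))
      · exact le_refl _

lemma low_char (d : PySem.Dict Int Int) (num : Int) :
    ∀ (f : Nat) (start k : Int), 0 ≤ start - (f : Int) → k < start →
      (pvLowA d num start f ≤ k ↔
        (start - (f : Int) ≤ k ∧ ∀ j : Int, k ≤ j → j < start → d.get? j = some num)) := by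
  intro f
  induction f with
  | zero =>
      intro start k _ hk
      simp only [pvLowA, Nat.cast_zero]
      constructor
      · intro h; omega
      · rintro ⟨h, -⟩; omega
  | succ f ih =>
      intro start k hf hk
      have hf' : ((f + 1 : Nat) : Int) = (f : Int) + 1 := by push_cast; ring
      rw [hf'] at hf ⊢
      simp only [pvLowA]
      by_cases hg : 0 < start ∧ d.get? (start - 1) = some num
      · rw [if_pos hg]
        by_cases hke : k = start - 1
        · subst hke
          constructor
          · intro _
            refine ⟨by omega, ?_⟩
            intro j hj1 hj2
            have : j = start - 1 := by omega
            rw [this]; exact hg.2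
          · intro _
            exact pvLowA_le d num f (start - 1)
        · have hk' : k < start - 1 := by omega
          rw [ih (start - 1) k (by omega) hk']
          constructor
          · rintro ⟨h1, h2⟩
            refine ⟨by omega, ?_⟩
            intro j hj1 hj2
            by_cases hjs : j = start - 1
            · rw [hjs]; exact hg.2
            · exact h2 j hj1 (by omega)
          · rintro ⟨h1, h2⟩
            exact ⟨by omega, fun j hj1 hj2 => h2 j hj1 (by omega)⟩
      · rw [if_neg hg]
        have h0 : 0 < start := by omega
        have hng : ¬ d.get? (start - 1) = some num := by
          intro h; exact hg ⟨h0, h⟩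
        constructor
        · intro h; omega
        · rintro ⟨-, h2⟩
          exact absurd (h2 (start - 1) (by omega) (by omega)) hng

lemma high_char (d : PySem.Dict Int Int) (num rl : Int) :
    ∀ (f : Nat) (start k : Int), rl = start + (f : Int) → start ≤ k →
      (k < pvHighA d num rl start f ↔
        (k < rl ∧ ∀ j : Int, start ≤ j → j ≤ k → d.get? j = some num)) := by
  intro f
  induction f with
  | zero =>
      intro start k hrl hk
      simp only [pvHighA, Nat.cast_zero] at hrl ⊢
      constructor
      · intro h; omega
      · rintro ⟨h, -⟩; omega
  | succ f ih =>
      intro start k hrl hk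
      have hf' : ((f + 1 : Nat) : Int) = (f : Int) + 1 := by push_cast; ring
      rw [hf'] at hrl
      simp only [pvHighA]
      have hlt : start < rl := by omega
      by_cases hg : d.get? start = some num
      · rw [if_pos ⟨hlt, hg⟩]
        by_cases hke : k = start
        · subst hke
          constructor
          · intro _
            refine ⟨by omega, ?_⟩
            intro j hj1 hj2
            have : j = k := by omega
            rw [this]; exact hg
          · intro _
            exact lt_of_lt_of_le (by omega) (le_pvHighA d num rl f (k + 1))
        · have hk' : start + 1 ≤ k := by omega
          rw [ih (start + 1) k (by omega) hk']
          constructor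
          · rintro ⟨h1, h2⟩
            refine ⟨h1, ?_⟩
            intro j hj1 hj2
            by_cases hjs : j = start
            · rw [hjs]; exact hg
            · exact h2 j (by omega) hj2
          · rintro ⟨h1, h2⟩
            exact ⟨h1, fun j hj1 hj2 => h2 j (by omega) hj2⟩
      · rw [if_neg (by rintro ⟨-, h⟩; exact hg h)]
        constructor
        · intro h; omega
        · rintro ⟨-, h2⟩
          exact absurd (h2 start le_rfl hk) hg

lemma find?_filter_keep (l : List (Int × Int)) (p : Int × Int → Bool) (j : Int)
    (h : ∀ kv ∈ l, kv.1 = j → p kv = true) :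
    List.find? (fun kv => kv.1 == j) (l.filter p) = List.find? (fun kv => kv.1 == j) l := by
  induction l with
  | nil => simp
  | cons kv t ih =>
      have ih' := ih (fun x hx e => h x (List.mem_cons_of_mem _ hx) e)
      by_cases hk : kv.1 = j
      · have hp : p kv = true := h kv (List.mem_cons_self) hk
        simp [hp, hk]
      · by_cases hp : p kv = true <;>
          simp [hp, hk, ih']

lemma get?_filter_keep (l : List (Int × Int)) (p : Int × Int → Bool) (j : Int)
    (h : ∀ kv ∈ l, kv.1 = j → p kv = true) :
    (PySem.Dict.mk (l.filter p)).get? j = (PySem.Dict.mk l).get? j := by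
  simp only [PySem.Dict.get?]
  rw [find?_filter_keep l p j h]

lemma get?_erase_of_ne (d : PySem.Dict Int Int) (k j : Int) (h : j ≠ k) :
    (d.erase k).get? j = d.get? j := by
  have hkeep : ∀ kv ∈ d.items, kv.1 = j → (!(kv.1 == k)) = true := by
    intro kv _ e
    simp [e, h]
  have := get?_filter_keep d.items (fun p => !(p.1 == k)) j hkeep
  simpa [PySem.Dict.erase] using this

lemma backA_eq (D : PySem.Dict Int Int) (num : Int) :
    ∀ (n : Nat) (d : PySem.Dict Int Int),
      (∀ i : Int, i < (n : Int) → d.get? i = D.get? i) →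
      (pvBackA D.keys num d n).items
        = d.items.filter (fun kv =>
            !(decide (pvLowA D num (n : Int) n ≤ kv.1) && decide (kv.1 < (n : Int)))) := by
  intro n
  induction n with
  | zero =>
      intro d _
      simp only [pvBackA, Nat.cast_zero, pvLowA]
      exact (List.filter_eq_self.mpr (by intro kv _; simp; omega)).symm
  | succ n ih =>
      intro d hd
      have hcast : ((n + 1 : Nat) : Int) = (n : Int) + 1 := by push_cast; ring
      by_cases hv : D.get? (n : Int) = some num
      · have hc : D.keys.contains (n : Int) = true := by
          rw [keys_contains_eq, hv]; rfl
        have hm : (n : Int) ∈ D.keys := by simpa using hc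
        have hdn : d.get? (n : Int) = D.get? (n : Int) := hd _ (by push_cast; omega)
        have hlow : pvLowA D num ((n + 1 : Nat) : Int) (n + 1) = pvLowA D num (n : Int) n := by
          rw [hcast]
          simp only [pvLowA]
          rw [if_pos ⟨by omega, by rw [show (n : Int) + 1 - 1 = (n : Int) from by ring]; exact hv⟩]
          congr 1
          ring
        rw [show pvBackA D.keys num d (n + 1) = pvBackA D.keys num (d.erase (n : Int)) n from by
              simp [pvBackA, hm, hdn, hv]]
        rw [ih (d.erase (n : Int)) (by
              intro i hi
              rw [get?_erase_of_ne _ _ _ (by omega)]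
              exact hd i (by push_cast; omega))]
        have herase : (d.erase (n : Int)).items = d.items.filter (fun p => !(p.1 == (n : Int))) := by
          simp [PySem.Dict.erase]
        have hle : pvLowA D num (n : Int) n ≤ (n : Int) := pvLowA_le D num n _
        rw [herase, List.filter_filter, hlow]
        apply List.filter_congr
        intro kv _
        rw [Bool.eq_iff_iff]
        simp only [Bool.and_eq_true, Bool.not_eq_true', Bool.and_eq_false_iff,
          decide_eq_false_iff_not, beq_eq_false_iff_ne, ne_eq, hcast]
        omega
      · have hA : pvBackA D.keys num d (n + 1) = d := by
          by_cases hm : (n : Int) ∈ D.keys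
          · have hdn : d.get? (n : Int) = D.get? (n : Int) := hd _ (by push_cast; omega)
            simp [pvBackA, hm, hdn, hv]
          · simp [pvBackA, hm]
        have hlow : pvLowA D num ((n + 1 : Nat) : Int) (n + 1) = ((n + 1 : Nat) : Int) := by
          simp only [pvLowA]
          rw [if_neg]
          rintro ⟨-, h2⟩
          rw [show ((n + 1 : Nat) : Int) - 1 = (n : Int) from by push_cast; ring] at h2
          exact hv h2
        rw [hA, hlow]
        exact (List.filter_eq_self.mpr (by intro kv _; simp; omega)).symm

lemma fwdA_eq (D : PySem.Dict Int Int) (num rl : Int) :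
    ∀ (f : Nat) (i : Int) (d : PySem.Dict Int Int), rl = i + f →
      (∀ j : Int, i ≤ j → d.get? j = D.get? j) →
      (pvFwdA D.keys num d i f).items
        = d.items.filter (fun kv =>
            !(decide (i ≤ kv.1) && decide (kv.1 < pvHighA D num rl i f))) := by
  intro f
  induction f with
  | zero =>
      intro i d _ _
      simp only [pvFwdA, pvHighA]
      exact (List.filter_eq_self.mpr (by intro kv _; simp; omega)).symm
  | succ f ih =>
      intro i d hrl hd
      have hirl : i < rl := by push_cast at hrl; omega
      by_cases hv : D.get? i = some num
      · have hc : D.keys.contains i = true := by rw [keys_contains_eq, hv]; rfl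
        have hm : i ∈ D.keys := by simpa using hc
        have hdi : d.get? i = D.get? i := hd i le_rfl
        have hhigh : pvHighA D num rl i (f + 1) = pvHighA D num rl (i + 1) f := by
          simp only [pvHighA]
          rw [if_pos ⟨hirl, hv⟩]
        rw [show pvFwdA D.keys num d i (f + 1) = pvFwdA D.keys num (d.erase i) (i + 1) f from by
              simp [pvFwdA, hm, hdi, hv]]
        rw [ih (i + 1) (d.erase i) (by push_cast at hrl ⊢; omega) (by
              intro j hj
              rw [get?_erase_of_ne _ _ _ (by omega)]
              exact hd j (by omega))]
        have herase : (d.erase i).items = d.items.filter (fun p => !(p.1 == i)) := by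
          simp [PySem.Dict.erase]
        have hge : i + 1 ≤ pvHighA D num rl (i + 1) f := le_pvHighA D num rl f (i + 1)
        rw [herase, List.filter_filter, hhigh]
        apply List.filter_congr
        intro kv _
        rw [Bool.eq_iff_iff]
        simp only [Bool.and_eq_true, Bool.not_eq_true', Bool.and_eq_false_iff,
          decide_eq_false_iff_not, beq_eq_false_iff_ne, ne_eq]
        omega
      · have hA : pvFwdA D.keys num d i (f + 1) = d := by
          by_cases hm : i ∈ D.keys
          · have hdi : d.get? i = D.get? i := hd i le_rfl
            simp [pvFwdA, hm, hdi, hv]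
          · simp [pvFwdA, hm]
        have hhigh : pvHighA D num rl i (f + 1) = i := by
          simp only [pvHighA]
          rw [if_neg (by rintro ⟨-, h2⟩; exact hv h2)]
        rw [hA, hhigh]
        exact (List.filter_eq_self.mpr (by intro kv _; simp; omega)).symm

-- A's result is the span filter, uniformly in all sign cases
lemma A_span (row : List (Int × Int)) (number index row_length : Int) :
    removeNumberFromRow row number index row_length
      = (PySem.Dict.ofList row).items.filter (fun kv =>
          !(decide (pvLowA (PySem.Dict.ofList row) number index index.toNat ≤ kv.1) &&
            decide (kv.1 < pvHighA (PySem.Dict.ofList row) number row_length index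
                      (row_length - index).toNat))) := by
  unfold removeNumberFromRow
  have hback := backA_eq (PySem.Dict.ofList row) number index.toNat (PySem.Dict.ofList row)
    (by intro i _; rfl)
  by_cases hidx : 0 ≤ index
  · have hni : ((index.toNat : Nat) : Int) = index := Int.toNat_of_nonneg hidx
    rw [hni] at hback
    have hd1get : ∀ j : Int, index ≤ j →
        (pvBackA (PySem.Dict.ofList row).keys number (PySem.Dict.ofList row) index.toNat).get? j
          = (PySem.Dict.ofList row).get? j := by
      intro j hj
      show (PySem.Dict.mk (pvBackA (PySem.Dict.ofList row).keys number
              (PySem.Dict.ofList row) index.toNat).items).get? j = _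
      rw [hback, get?_filter_keep]
      intro kv _ hkv
      simp
      omega
    by_cases hrl : index ≤ row_length
    · have hf : row_length = index + ((row_length - index).toNat : Int) := by
        rw [Int.toNat_of_nonneg (by omega)]; ring
      rw [fwdA_eq (PySem.Dict.ofList row) number row_length (row_length - index).toNat index _
            hf hd1get]
      rw [hback, List.filter_filter]
      have h1 : pvLowA (PySem.Dict.ofList row) number index index.toNat ≤ index :=
        pvLowA_le _ _ _ _
      have h2 : index ≤ pvHighA (PySem.Dict.ofList row) number row_length index
          (row_length - index).toNat := le_pvHighA _ _ _ _ _
      apply List.filter_congr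
      intro kv _
      rw [Bool.eq_iff_iff]
      simp only [Bool.and_eq_true, Bool.not_eq_true', Bool.and_eq_false_iff,
        decide_eq_false_iff_not]
      omega
    · have hf0 : (row_length - index).toNat = 0 := by omega
      rw [hf0]
      simp only [pvFwdA, pvHighA]
      exact hback
  · have hn0 : index.toNat = 0 := by omega
    rw [hn0]
    simp only [pvBackA, pvLowA]
    by_cases hrl : index ≤ row_length
    · have hf : row_length = index + ((row_length - index).toNat : Int) := by
        rw [Int.toNat_of_nonneg (by omega)]; ring
      rw [fwdA_eq (PySem.Dict.ofList row) number row_length (row_length - index).toNat index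
        (PySem.Dict.ofList row) hf (by intro j _; rfl)]
      apply List.filter_congr
      intro kv _
      rw [Bool.eq_iff_iff]
      have h2 : index ≤ pvHighA (PySem.Dict.ofList row) number row_length index
          (row_length - index).toNat := le_pvHighA _ _ _ _ _
      simp only [Bool.not_eq_true', Bool.and_eq_false_iff,
        decide_eq_false_iff_not]
    · have hf0 : (row_length - index).toNat = 0 := by omega
      rw [hf0]
      simp only [pvFwdA, pvHighA]
      exact (List.filter_eq_self.mpr (by intro kv _; simp; omega)).symm

-- B's per-key test coincides with membership in A's span
lemma predEq (d : PySem.Dict Int Int) (number index row_length : Int) (k : Int) :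
    pvRemovedB d number index row_length k
      = (decide (pvLowA d number index index.toNat ≤ k) &&
         decide (k < pvHighA d number row_length index (row_length - index).toNat)) := by
  have hall : ∀ (a b : Int),
      ((PySem.List.pyRange a b 1).all (fun j => d.get? j == some number) = true)
        ↔ (∀ j : Int, a ≤ j → j < b → d.get? j = some number) := by
    intro a b
    rw [List.all_eq_true]
    constructor
    · intro h j hj1 hj2
      have := h j (PySem.List.mem_pyRange_one.mpr ⟨hj1, hj2⟩)
      simpa using this
    · intro h j hj
      obtain ⟨h1, h2⟩ := PySem.List.mem_pyRange_one.mp hj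
      simpa using h j h1 h2
  rw [Bool.eq_iff_iff]
  simp only [pvRemovedB]
  by_cases hki : k < index
  · rw [if_pos hki]
    have hkh : k < pvHighA d number row_length index (row_length - index).toNat :=
      lt_of_lt_of_le hki (le_pvHighA _ _ _ _ _)
    by_cases hidx : 0 ≤ index
    · have hni : ((index.toNat : Nat) : Int) = index := Int.toNat_of_nonneg hidx
      have hc := low_char d number index.toNat index k (by omega) hki
      simp only [Bool.and_eq_true, decide_eq_true_eq, hall]
      rw [hc]
      constructor
      · rintro ⟨h1, h2⟩; exact ⟨⟨by omega, h2⟩, hkh⟩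
      · rintro ⟨⟨h1, h2⟩, -⟩; exact ⟨by omega, h2⟩
    · have hn0 : index.toNat = 0 := by omega
      rw [hn0]
      simp only [pvLowA, Bool.and_eq_true, decide_eq_true_eq]
      constructor
      · rintro ⟨h1, -⟩; omega
      · rintro ⟨h1, -⟩; omega
  · rw [if_neg hki]
    have hkl : pvLowA d number index index.toNat ≤ k :=
      le_trans (pvLowA_le _ _ _ _) (by omega)
    by_cases hrl : index ≤ row_length
    · have hf : row_length = index + ((row_length - index).toNat : Int) := by
        rw [Int.toNat_of_nonneg (by omega)]; ring
      have hc := high_char d number row_length (row_length - index).toNat index k hf (by omega)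
      simp only [Bool.and_eq_true, decide_eq_true_eq, hall]
      rw [hc]
      constructor
      · rintro ⟨h1, h2⟩
        exact ⟨hkl, h1, fun j hj1 hj2 => h2 j hj1 (by omega)⟩
      · rintro ⟨-, h1, h2⟩
        exact ⟨h1, fun j hj1 hj2 => h2 j hj1 (by omega)⟩
    · have hf0 : (row_length - index).toNat = 0 := by omega
      rw [hf0]
      simp only [pvHighA, Bool.and_eq_true, decide_eq_true_eq]
      constructor
      · rintro ⟨h1, -⟩; omega
      · rintro ⟨-, h1⟩; omega

-- ===== VERDICT (by name: the statement is the Claim_ definition above) =====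
theorem removeNumberFromRow_spec : Claim_equal_removeNumberFromRow := by
  intro row number index row_length _
  unfold Spec_removeNumberFromRow removeNumberFromRow_alt
  rw [A_span]
  apply List.filter_congr
  intro kv _
  rw [predEq]
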